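-- pv_equiv track=rewrite | github.com/DXZDXZ/AIGA | tools/utils.py | build_edge_index
-- ===== SOURCE A (Python) =====
-- def build_edge_index(chrom, inverse=False):
--     froms, tos = [], []
--     if not inverse:
--         froms.append(chrom[-1])
--         tos.append(chrom[0])
--     else:
--         froms.append(chrom[0])
--         tos.append(chrom[-1])
--     for c in range(len(chrom) - 1):
--         if not inverse:
--             froms.append(chrom[c])
--             tos.append(chrom[c + 1])
--         else:
--             froms.append(chrom[c + 1])
--             tos.append(chrom[c])
--     edge_index = [froms, tos]
--
--     return edge_index
-- ===== SOURCE B (Python) =====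
-- def build_edge_index(chrom, inverse=False):
--     nodes = list(chrom)
--     pred = [chrom[-1]] + nodes[:-1]
--     return [nodes, pred] if inverse else [pred, nodes]
-- ===== Notes on version B (the rewrite author's own statement) =====
-- stated objective: simpler
-- what changed: Replaces the per-index append loop with whole-list construction: the predecessor column is the last element prepended to the dropLast slice of chrom, the successor column is chrom itself.
import Mathlib
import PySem

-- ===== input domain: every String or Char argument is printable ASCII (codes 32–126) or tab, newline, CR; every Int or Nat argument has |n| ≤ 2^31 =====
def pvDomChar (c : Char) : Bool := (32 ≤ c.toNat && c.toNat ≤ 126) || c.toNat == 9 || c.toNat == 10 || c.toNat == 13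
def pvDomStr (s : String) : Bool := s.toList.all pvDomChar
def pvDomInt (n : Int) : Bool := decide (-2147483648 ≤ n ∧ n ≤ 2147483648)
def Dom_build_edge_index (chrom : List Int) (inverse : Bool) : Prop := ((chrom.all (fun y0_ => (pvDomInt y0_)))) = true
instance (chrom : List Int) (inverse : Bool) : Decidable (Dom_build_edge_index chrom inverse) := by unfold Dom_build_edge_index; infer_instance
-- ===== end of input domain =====

-- B builds both columns at once by slicing (predecessors = last element prepended to the dropLast slice, successors = chrom)
-- instead of A's per-index append loop; objective: simpler. Both raise IndexError on the empty chromosome (excluded by Pre_).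

-- ===== PORT A =====
def build_edge_index (chrom : List Int) (inverse : Bool) : List (List Int) :=
  -- froms, tos = [], []; seed with the wrap-around edge, then loop c in range(len(chrom)-1)
  let seed : List Int × List Int :=
    if !inverse then
      ([(PySem.List.pyGet? chrom (-1)).getD 0], [(PySem.List.pyGet? chrom 0).getD 0])
    else
      ([(PySem.List.pyGet? chrom 0).getD 0], [(PySem.List.pyGet? chrom (-1)).getD 0])
  let st := (PySem.List.pyRange 0 ((chrom.length : Int) - 1) 1).foldl
    (fun (acc : List Int × List Int) c =>
      if !inverse then
        (acc.1 ++ [PySem.List.pyGetD chrom c 0], acc.2 ++ [PySem.List.pyGetD chrom (c + 1) 0])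
      else
        (acc.1 ++ [PySem.List.pyGetD chrom (c + 1) 0], acc.2 ++ [PySem.List.pyGetD chrom c 0]))
    seed
  [st.1, st.2]

-- ===== PORT B =====
def build_edge_index_alt (chrom : List Int) (inverse : Bool) : List (List Int) :=
  let nodes := chrom
  let pred := [(PySem.List.pyGet? chrom (-1)).getD 0] ++ PySem.List.slice nodes none (some (-1))
  if inverse then [nodes, pred] else [pred, nodes]

-- ===== PRECONDITION & SPEC =====
-- Pre_ excludes the empty chromosome, on which both Pythons raise IndexError (negative indexing of the last element).
def Pre_build_edge_index (chrom : List Int) (inverse : Bool) : Prop := chrom ≠ []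
instance (chrom : List Int) (inverse : Bool) : Decidable (Pre_build_edge_index chrom inverse) := by unfold Pre_build_edge_index; infer_instance
def pvWitness_build_edge_index : List Int × Bool := ([3, 1, 2], false)

def Spec_build_edge_index (chrom : List Int) (inverse : Bool) (out : List (List Int)) : Prop := out = build_edge_index_alt chrom inverse
instance (chrom : List Int) (inverse : Bool) (out : List (List Int)) : Decidable (Spec_build_edge_index chrom inverse out) := by unfold Spec_build_edge_index; infer_instance

-- ===== CLAIM (what is proved, stated in full; the proofs are below) =====
def Claim_equal_build_edge_index : Prop := ∀ (chrom : List Int) (inverse : Bool), Dom_build_edge_index chrom inverse → Pre_build_edge_index chrom inverse → Spec_build_edge_index chrom inverse (build_edge_index chrom inverse)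

-- ===== LEMMAS AND PROOFS =====

-- The pair-fold splits into two independent append-folds, each of which is init ++ map.
theorem pv_fold_pair (l : List Int) (f g : Int → Int) (a b : List Int) :
    l.foldl (fun (acc : List Int × List Int) c => (acc.1 ++ [f c], acc.2 ++ [g c])) (a, b)
      = (a ++ l.map f, b ++ l.map g) := by
  induction l generalizing a b with
  | nil => simp
  | cons x xs ih => simp [List.foldl_cons, ih]

-- reading chrom[c] for c in range(len(chrom)-1) yields chrom.dropLast
theorem pv_map_getD_dropLast (chrom : List Int) :
    (PySem.List.pyRange 0 ((chrom.length : Int) - 1) 1).map (fun c => PySem.List.pyGetD chrom c 0)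
      = chrom.dropLast := by
  rw [PySem.List.pyRange_one]
  apply List.ext_getElem
  · simp
  · intro k h1 h2
    simp only [List.getElem_map, List.getElem_dropLast, List.getElem_range]
    rw [show (0 : Int) + (k : Int) = ((k : Nat) : Int) by omega]
    rw [PySem.List.pyGetD_natCast]
    have hk' : k < chrom.length := by simp at h1; omega
    simp [List.getD, List.getElem?_eq_getElem hk']

-- reading chrom[c+1] for c in range(len(chrom)-1) yields chrom.tail
theorem pv_map_getD_tail (chrom : List Int) :
    (PySem.List.pyRange 0 ((chrom.length : Int) - 1) 1).map (fun c => PySem.List.pyGetD chrom (c + 1) 0)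
      = chrom.tail := by
  rw [PySem.List.pyRange_one]
  apply List.ext_getElem
  · simp [List.length_tail]
  · intro k h1 h2
    simp only [List.getElem_map, List.getElem_range]
    have h1' : k < ((chrom.length : Int) - 1).toNat := by simpa using h1
    have hk' : k + 1 < chrom.length := by omega
    rw [show (0 : Int) + (k : Int) + 1 = ((k + 1 : Nat) : Int) by push_cast; ring]
    rw [PySem.List.pyGetD_natCast, List.getElem_tail]
    simp [List.getD, List.getElem?_eq_getElem hk']

theorem pv_main (chrom : List Int) (inverse : Bool) (h : chrom ≠ []) :
    build_edge_index chrom inverse = build_edge_index_alt chrom inverse := by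
  obtain ⟨y, ys, rfl⟩ := List.exists_cons_of_ne_nil h
  cases inverse with
  | false =>
    simp only [build_edge_index, build_edge_index_alt, Bool.not_false, reduceIte,
      PySem.List.slice_to_neg_one]
    rw [pv_fold_pair, pv_map_getD_dropLast, pv_map_getD_tail]
    simp [PySem.List.pyGet?, PySem.List.pyIdx?]
  | true =>
    simp only [build_edge_index, build_edge_index_alt, Bool.not_true, Bool.false_eq_true, if_false, reduceIte,
      PySem.List.slice_to_neg_one]
    rw [pv_fold_pair, pv_map_getD_dropLast, pv_map_getD_tail]
    simp [PySem.List.pyGet?, PySem.List.pyIdx?]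

-- ===== VERDICT (by name: the statement is the Claim_ definition above) =====
theorem build_edge_index_spec : Claim_equal_build_edge_index := by
  intro chrom inverse _ hpre
  exact pv_main chrom inverse hpre
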